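-- pv_equiv track=rewrite | github.com/EverydayQA/prima | pytests/test_recur.py | subSandwich
-- ===== SOURCE A (Python) =====
-- def subSandwich(word, char, pos, start, end):
--     if pos == len(word) -1:
--         if end == 0:
--             return len(char)
--         return end -(start -2)
--
--     if word[pos:pos+len(char)] == char:
--         if start != 0:
--             end = pos + len(char) - 1
--         else:
--             start = pos + 1
--     return subSandwich(word, char, pos + 1, start, end)
-- ===== SOURCE B (Python) =====
-- def subSandwich(word, char, pos, start, end):
--     L = len(char)
--     matches = [p for p in range(pos, len(word) - 1) if word[p:p + L] == char]
--     for m in matches: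
--         if start == 0:
--             start = m + 1
--         else:
--             end = m + L - 1
--     return L if end == 0 else end - (start - 2)
-- ===== Notes on version B (the rewrite author's own statement) =====
-- stated objective: simpler
-- what changed: A's tail recursion threading (pos,start,end) through every index is replaced by a single range comprehension that collects the match positions and one plain fold of the start/end update over that match list, then the closing formula.
-- outside the precondition, e.g. on subSandwich('ab', 'x', -9500, 0, 0): A returns 1, B returns 1
import Mathlib
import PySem

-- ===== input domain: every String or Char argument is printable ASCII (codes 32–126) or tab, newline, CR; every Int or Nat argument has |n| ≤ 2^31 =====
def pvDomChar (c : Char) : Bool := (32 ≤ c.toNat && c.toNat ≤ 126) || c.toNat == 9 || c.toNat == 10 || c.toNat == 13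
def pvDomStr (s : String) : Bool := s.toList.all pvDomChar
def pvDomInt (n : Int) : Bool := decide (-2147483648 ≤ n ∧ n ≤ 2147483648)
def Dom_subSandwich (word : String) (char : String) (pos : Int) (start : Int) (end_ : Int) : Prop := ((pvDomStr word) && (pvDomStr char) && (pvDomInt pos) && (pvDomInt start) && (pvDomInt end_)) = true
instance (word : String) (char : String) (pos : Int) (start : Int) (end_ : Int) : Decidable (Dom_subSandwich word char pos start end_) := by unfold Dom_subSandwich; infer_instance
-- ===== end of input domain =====

-- B replaces A's tail recursion by a match-position comprehension plus one fold of the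
-- identical start/end update (objective: simpler — no recursion, two small phases).

-- ===== PORT A =====
-- Literal port of A's recursion. The final 'else 0' branch (pos past the terminal index)
-- is only a totality guard: there the Python A recurses forever and raises RecursionError,
-- and Pre_subSandwich excludes those inputs.
def subSandwich (word : String) (char : String) (pos : Int) (start : Int) (end_ : Int) : Int :=
  if pos = PySem.Str.len word - 1 then
    if end_ = 0 then PySem.Str.len char else end_ - (start - 2)
  else if pos < PySem.Str.len word - 1 then
    if PySem.Str.slice word (some pos) (some (pos + PySem.Str.len char)) = char then
      if start ≠ 0 then
        subSandwich word char (pos + 1) start (pos + PySem.Str.len char - 1)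
      else
        subSandwich word char (pos + 1) (pos + 1) end_
    else
      subSandwich word char (pos + 1) start end_
  else 0
termination_by (PySem.Str.len word - 1 - pos).toNat
decreasing_by all_goals omega

-- ===== PORT B =====
def subSandwich_alt (word : String) (char : String) (pos : Int) (start : Int) (end_ : Int) : Int :=
  let L := PySem.Str.len char
  let ms := (PySem.List.pyRange pos (PySem.Str.len word - 1) 1).filter
      (fun p => decide (PySem.Str.slice word (some p) (some (p + L)) = char))
  let se := ms.foldl
      (fun (se : Int × Int) m => if se.1 = 0 then (m + 1, se.2) else (se.1, m + PySem.Str.len char - 1))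
      (start, end_)
  if se.2 = 0 then L else se.2 - (se.1 - 2)

-- ===== PRECONDITION & SPEC =====
-- Pre_ excludes exactly the calls on which the Python A raises RecursionError instead of
-- returning: pos past the terminal index len(word)-1 (the recursion never reaches its base
-- case), and calls whose recursion depth len(word)-1-pos exceeds the interpreter's stack
-- budget; the depth bound 9000 is conservative (the exact overflow point depends on stack
-- state), so a narrow band of very deep calls on which A still returns is also excluded.
def Pre_subSandwich (word : String) (char : String) (pos : Int) (start : Int) (end_ : Int) : Prop :=
  pos ≤ PySem.Str.len word - 1 ∧ PySem.Str.len word - 1 - pos ≤ 9000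
instance (word : String) (char : String) (pos : Int) (start : Int) (end_ : Int) : Decidable (Pre_subSandwich word char pos start end_) := by unfold Pre_subSandwich; infer_instance
def pvWitness_subSandwich : String × String × Int × Int × Int := ("banana", "an", 0, 0, 0)

def Spec_subSandwich (word : String) (char : String) (pos : Int) (start : Int) (end_ : Int) (out : Int) : Prop := out = subSandwich_alt word char pos start end_
instance (word : String) (char : String) (pos : Int) (start : Int) (end_ : Int) (out : Int) : Decidable (Spec_subSandwich word char pos start end_ out) := by unfold Spec_subSandwich; infer_instance

-- ===== CLAIM (what is proved, stated in full; the proofs are below) =====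
def Claim_equal_subSandwich : Prop := ∀ (word : String) (char : String) (pos : Int) (start : Int) (end_ : Int), Dom_subSandwich word char pos start end_ → Pre_subSandwich word char pos start end_ → Spec_subSandwich word char pos start end_ (subSandwich word char pos start end_)

-- ===== LEMMAS AND PROOFS =====

-- B at the terminal index: the match list is empty, so the fold returns (start, end_).
theorem alt_base (word char : String) (pos start end_ : Int)
    (h : pos = (word.toList.length : Int) - 1) :
    subSandwich_alt word char pos start end_ =
      if end_ = 0 then (char.toList.length : Int) else end_ - (start - 2) := by
  simp only [subSandwich_alt, PySem.Str.len_eq]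
  rw [PySem.List.pyRange_one_eq_nil (by omega)]
  simp

-- B consumes one position: peeling the head of the range/filter/fold performs exactly
-- A's per-index case analysis.
theorem alt_step (word char : String) (pos start end_ : Int)
    (h : pos < (word.toList.length : Int) - 1) :
    subSandwich_alt word char pos start end_ =
      if PySem.Str.slice word (some pos) (some (pos + (char.toList.length : Int))) = char then
        if start = 0 then subSandwich_alt word char (pos + 1) (pos + 1) end_
        else subSandwich_alt word char (pos + 1) start (pos + (char.toList.length : Int) - 1)
      else subSandwich_alt word char (pos + 1) start end_ := by
  conv_lhs => simp only [subSandwich_alt, PySem.Str.len_eq]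
  rw [PySem.List.pyRange_one_cons h, List.filter_cons]
  by_cases hm : PySem.Str.slice word (some pos) (some (pos + (char.toList.length : Int))) = char
  · by_cases hs : start = 0 <;> simp_all [subSandwich_alt]
  · simp_all [subSandwich_alt]

theorem key (word char : String) : ∀ (k : Nat) (pos start end_ : Int),
    ((word.toList.length : Int) - 1 - pos).toNat = k → pos ≤ (word.toList.length : Int) - 1 →
    subSandwich word char pos start end_ = subSandwich_alt word char pos start end_ := by
  intro k
  induction k with
  | zero =>
    intro pos start end_ hk hle
    rw [subSandwich, alt_base word char pos start end_ (by omega)]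
    simp only [PySem.Str.len_eq]
    rw [if_pos (by omega : pos = (word.toList.length : Int) - 1)]
  | succ k ih =>
    intro pos start end_ hk hle
    have hlt : pos < (word.toList.length : Int) - 1 := by omega
    rw [subSandwich, alt_step word char pos start end_ hlt]
    simp only [PySem.Str.len_eq]
    rw [if_neg (by omega : ¬ pos = (word.toList.length : Int) - 1), if_pos hlt]
    by_cases hm : PySem.Str.slice word (some pos) (some (pos + (char.toList.length : Int))) = char
    · by_cases hs : start = 0
      · simp only [hm, hs, if_true, ne_eq, not_true_eq_false, if_false]
        exact ih (pos + 1) (pos + 1) end_ (by omega) (by omega)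
      · simp only [hm, if_true, ne_eq, hs, not_false_eq_true]
        exact ih (pos + 1) start (pos + (char.toList.length : Int) - 1) (by omega) (by omega)
    · simp only [hm, if_false]
      exact ih (pos + 1) start end_ (by omega) (by omega)

-- ===== VERDICT (by name: the statement is the Claim_ definition above) =====
theorem subSandwich_spec : Claim_equal_subSandwich := by
  intro word char pos start end_ _hdom hpre
  have h1 := hpre.1
  simp only [PySem.Str.len_eq] at h1
  exact key word char ((word.toList.length : Int) - 1 - pos).toNat pos start end_ rfl h1
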